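-- pv_equiv track=rewrite | github.com/chae1park/codingtest | DFS_BFS/감시_피하기.py | check_std
-- ===== SOURCE A (Python) =====
-- n = 4
--
-- def check_1direction(data, x, y, d_x, d_y):
--
--     while (0 <= x < n) and (0 <= y < n):
--         if data[x][y] == 'S':
--             return False
--         elif data[x][y] == 'O':
--             break # 해당 방향으로 더이상 탐사하지 않음
--         else:
--             x, y = x+d_x, y+d_y
--
--     # 학생을 찾기 전에 장애물에 부딪혔거나 맵을 벗어난 경우 True 반환
--     return True
--
-- def check_std(teachers, data, IsAvoided):
--     # 상하좌우
--     dx = [-1, 1, 0 ,0]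
--     dy = [0, 0, -1, 1]
--     for t_x, t_y in teachers:
--
--         for i in range(4):
--             # 각 방향마다 학생이 적발되었는지 검사
--             nx = t_x + dx[i]
--             ny = t_y + dy[i]
--             # 만약 적발되지 않았다면 계속 검사 (적발: False 반환)
--             if check_1direction(data, nx, ny, dx[i], dy[i]):
--                 continue
--             # 적발 되었다면 빨리 종료함
--             else:
--                 return False
--     # 모든 선생님 기준으로 돌았는데 전부 적발되지 않았다면 그대로 True 반환
--     return True
-- ===== SOURCE B (Python) =====
-- n = 4
--
-- def _ray_hits_teacher(teacher_set, data, sx, sy, dx, dy):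
--     # Walk from the student cell toward (dx, dy); a teacher on the line with no
--     # obstacle 'O' strictly in between sees the student.
--     x, y = sx + dx, sy + dy
--     while 0 <= x < len(data) and 0 <= y < len(data[x]):
--         if (x, y) in teacher_set:
--             return True
--         if data[x][y] == 'O':
--             return False
--         x, y = x + dx, y + dy
--     return False
--
-- def check_std(teachers, data, IsAvoided):
--     # Invert the traversal: students cast rays toward a set of teacher positions.
--     teacher_set = {(tx, ty) for tx, ty in teachers}
--     for sx, row in enumerate(data):
--         for sy, cell in enumerate(row):
--             if cell != 'S':
--                 continue
--             for dx, dy in ((-1, 0), (1, 0), (0, -1), (0, 1)):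
--                 if _ray_hits_teacher(teacher_set, data, sx, sy, dx, dy):
--                     return False
--     return True
-- ===== Notes on version B (the rewrite author's own statement) =====
-- stated objective: alternative
-- what changed: B inverts the traversal: it scans the board for student cells and casts rays from each student toward a set of teacher positions (stopping at an obstacle 'O' or the board edge), instead of A's walk of four watch rays from every teacher until it hits 'S'/'O'/the fixed 4x4 border; …
-- outside the precondition, e.g. on check_std([(0, 5)], [['S', '.', '.', '.', '.', '.']], False): A returns True, B returns False; on check_std([(1, 0)], [['S']], False): A returns False, B returns True
import Mathlib
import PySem

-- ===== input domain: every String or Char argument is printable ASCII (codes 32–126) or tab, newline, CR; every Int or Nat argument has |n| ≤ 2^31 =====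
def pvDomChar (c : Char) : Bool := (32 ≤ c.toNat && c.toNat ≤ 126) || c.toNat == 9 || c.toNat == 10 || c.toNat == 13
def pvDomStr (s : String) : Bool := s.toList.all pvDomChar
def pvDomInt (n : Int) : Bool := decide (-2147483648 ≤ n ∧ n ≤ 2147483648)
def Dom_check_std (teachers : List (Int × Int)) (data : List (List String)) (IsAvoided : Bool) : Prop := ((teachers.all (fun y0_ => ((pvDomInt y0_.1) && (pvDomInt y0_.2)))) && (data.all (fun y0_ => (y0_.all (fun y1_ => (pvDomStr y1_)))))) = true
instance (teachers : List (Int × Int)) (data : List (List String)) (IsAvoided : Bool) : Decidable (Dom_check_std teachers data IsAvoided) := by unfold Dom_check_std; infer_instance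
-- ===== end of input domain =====

-- B inverts the traversal: it scans the board for student cells and casts a ray from each
-- student toward a set of teacher positions; objective: alternative (different decomposition,
-- similar cost).

-- ===== PORT A =====
-- while-loop of check_1direction as fuel recursion: inside the fixed 4×4 grid a unit-direction
-- walk performs at most 5 condition checks, so fuel 8 is never exhausted (the 0-fuel arm is dead
-- for the four directions A uses).  data[x][y] is ported as pyGetD; exact under Pre_check_std,
-- which guarantees every in-grid access is in range.
def check1dir (data : List (List String)) (dx dy : Int) : Nat → Int → Int → Bool
  | 0, _, _ => true
  | fuel+1, x, y =>
    if 0 ≤ x ∧ x < 4 ∧ 0 ≤ y ∧ y < 4 then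
      if PySem.List.pyGetD (PySem.List.pyGetD data x []) y "" == "S" then false
      else if PySem.List.pyGetD (PySem.List.pyGetD data x []) y "" == "O" then true
      else check1dir data dx dy fuel (x+dx) (y+dy)
    else true

-- inner 'for i in range(4)' with early return False
def dirLoop (data : List (List String)) (tx ty : Int) : List Int → Bool
  | [] => true
  | i :: rest =>
    let dxi := PySem.List.pyGetD [(-1 : Int), 1, 0, 0] i 0
    let dyi := PySem.List.pyGetD [(0 : Int), 0, -1, 1] i 0
    if check1dir data dxi dyi 8 (tx + dxi) (ty + dyi) then dirLoop data tx ty rest else false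

-- outer 'for t_x, t_y in teachers' with early return False
def teachLoop (data : List (List String)) : List (Int × Int) → Bool
  | [] => true
  | (tx, ty) :: rest => if dirLoop data tx ty (PySem.List.pyRange 0 4 1) then teachLoop data rest else false

def check_std (teachers : List (Int × Int)) (data : List (List String)) (IsAvoided : Bool) : Bool :=
  teachLoop data teachers

-- ===== PORT B =====
-- _ray_hits_teacher of Source B: a while loop walking one unit step per iteration inside the bounds
-- of the actual board (len(data) / len(data[x])); the fuel is only a termination device — one
-- coordinate moves monotonically inside its bound, so data.length + (max row length) + 2 steps
-- are never exhausted.  data[x][y] is ported as pyGetD (the guard checks the indices are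
-- non-negative and in range, where pyGetD is exact).
def rayHits (tset : PySem.Set (Int × Int)) (data : List (List String)) (dx dy : Int) : Nat → Int → Int → Bool
  | 0, _, _ => false
  | fuel+1, x, y =>
    if 0 ≤ x ∧ x < (data.length : Int) ∧ 0 ≤ y ∧ y < ((PySem.List.pyGetD data x []).length : Int) then
      if PySem.Set.contains tset (x, y) then true
      else if PySem.List.pyGetD (PySem.List.pyGetD data x []) y "" == "O" then false
      else rayHits tset data dx dy fuel (x+dx) (y+dy)
    else false

def maxRowLen (data : List (List String)) : Nat := data.foldr (fun r m => max r.length m) 0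

def bFuel (data : List (List String)) : Nat := data.length + maxRowLen data + 2

-- the nested 'for … in enumerate' loops with early return False are the nested .any;
-- the set comprehension over teachers is PySem.Set.ofList
def check_std_alt (teachers : List (Int × Int)) (data : List (List String)) (IsAvoided : Bool) : Bool :=
  let tset := PySem.Set.ofList teachers
  !((PySem.List.enumerate data 0).any fun p =>
      (PySem.List.enumerate p.2 0).any fun q =>
        (q.2 == "S") &&
        ([((-1 : Int), (0 : Int)), (1, 0), (0, -1), (0, 1)].any fun d =>
          rayHits tset data d.1 d.2 (bFuel data) (p.1 + d.1) (q.1 + d.2)))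

-- ===== PRECONDITION & SPEC =====
def onGrid (t : Int × Int) : Prop := 0 ≤ t.1 ∧ t.1 < 4 ∧ 0 ≤ t.2 ∧ t.2 < 4
def nearGrid (t : Int × Int) : Prop :=
  (-1 ≤ t.1 ∧ t.1 ≤ 4 ∧ 0 ≤ t.2 ∧ t.2 < 4) ∨ (0 ≤ t.1 ∧ t.1 < 4 ∧ -1 ≤ t.2 ∧ t.2 ≤ 4)
def onData (data : List (List String)) (t : Int × Int) : Prop :=
  0 ≤ t.1 ∧ t.1 < (data.length : Int) ∧ 0 ≤ t.2 ∧ t.2 < ((data.getD t.1.toNat []).length : Int)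
def fullGrid (data : List (List String)) : Prop :=
  4 ≤ data.length ∧ ∀ row ∈ data.take 4, 4 ≤ row.length
def noStudentOutside (data : List (List String)) : Prop :=
  (∀ row ∈ data.drop 4, ∀ c ∈ row, c ≠ "S") ∧ (∀ row ∈ data.take 4, ∀ c ∈ row.drop 4, c ≠ "S")

-- Pre_ restricts to the natural domain of the fixed 4×4 problem: teachers either on the 4×4
-- grid or too far from it to watch any grid cell, a board covering the whole grid whenever a
-- teacher stands on it (A usually raises IndexError on partial boards), off-grid teachers not
-- sitting on extra cells of an oversized board, and no student cell outside the grid when a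
-- teacher is on it — on the excluded off-board/oversized corners where A still returns, its
-- value is an accident of the fixed n = 4 ray bounds (see cites in claim.json).
def Pre_check_std (teachers : List (Int × Int)) (data : List (List String)) (IsAvoided : Bool) : Prop :=
  (∀ t ∈ teachers, nearGrid t → onGrid t) ∧
  (∀ t ∈ teachers, ¬ onGrid t → ¬ onData data t) ∧
  ((∃ t ∈ teachers, onGrid t) → fullGrid data ∧ noStudentOutside data)
instance (teachers : List (Int × Int)) (data : List (List String)) (IsAvoided : Bool) : Decidable (Pre_check_std teachers data IsAvoided) := by
  unfold Pre_check_std onGrid nearGrid onData fullGrid noStudentOutside; infer_instance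

def pvWitness_check_std : (List (Int × Int)) × List (List String) × Bool :=
  ([(0, 0)], [[".", ".", ".", "."], [".", "S", "O", "."], [".", ".", ".", "."], ["O", ".", ".", "S"]], true)

def Spec_check_std (teachers : List (Int × Int)) (data : List (List String)) (IsAvoided : Bool) (out : Bool) : Prop := out = check_std_alt teachers data IsAvoided
instance (teachers : List (Int × Int)) (data : List (List String)) (IsAvoided : Bool) (out : Bool) : Decidable (Spec_check_std teachers data IsAvoided out) := by unfold Spec_check_std; infer_instance

-- ===== CLAIM (what is proved, stated in full; the proofs are below) =====
def Claim_equal_check_std : Prop := ∀ (teachers : List (Int × Int)) (data : List (List String)) (IsAvoided : Bool), Dom_check_std teachers data IsAvoided → Pre_check_std teachers data IsAvoided → Spec_check_std teachers data IsAvoided (check_std teachers data IsAvoided)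

-- ===== LEMMAS AND PROOFS =====

def inG (x y : Int) : Prop := 0 ≤ x ∧ x < 4 ∧ 0 ≤ y ∧ y < 4
def cellAt (data : List (List String)) (x y : Int) : String :=
  PySem.List.pyGetD (PySem.List.pyGetD data x []) y ""
def okB (data : List (List String)) (x y : Int) : Prop :=
  0 ≤ x ∧ x < (data.length : Int) ∧ 0 ≤ y ∧ y < ((PySem.List.pyGetD data x []).length : Int)

-- A's detection predicate for one teacher (tx, ty): some grid student on its row or column
-- with no obstacle strictly between
def SeenA (data : List (List String)) (tx ty : Int) : Prop :=
  (∃ s : Int, ((0 ≤ tx ∧ tx < 4) ∧ 0 ≤ s ∧ s < 4) ∧ cellAt data tx s = "S" ∧ s ≠ ty ∧ -1 ≤ ty ∧ ty ≤ 4 ∧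
      ∀ y : Int, min s ty < y → y < max s ty → cellAt data tx y ≠ "O") ∨
  (∃ s : Int, ((0 ≤ ty ∧ ty < 4) ∧ 0 ≤ s ∧ s < 4) ∧ cellAt data s ty = "S" ∧ s ≠ tx ∧ -1 ≤ tx ∧ tx ≤ 4 ∧
      ∀ x : Int, min s tx < x → x < max s tx → cellAt data x ty ≠ "O")

-- B's detection predicates for one student (sx, sy): a teacher on its column / row, on an
-- existing cell, with no obstacle strictly between
def VertHit (teachers : List (Int × Int)) (data : List (List String)) (sx sy : Int) : Prop :=
  ∃ u : Int, okB data u sy ∧ (u, sy) ∈ teachers ∧ u ≠ sx ∧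
    ∀ y : Int, min sx u < y → y < max sx u → okB data y sy ∧ cellAt data y sy ≠ "O"
def HorizHit (teachers : List (Int × Int)) (data : List (List String)) (sx sy : Int) : Prop :=
  ∃ v : Int, okB data sx v ∧ (sx, v) ∈ teachers ∧ v ≠ sy ∧
    ∀ y : Int, min sy v < y → y < max sy v → okB data sx y ∧ cellAt data sx y ≠ "O"

lemma teachLoop_true_iff (data : List (List String)) :
    ∀ ts : List (Int × Int), teachLoop data ts = true ↔
      ∀ t ∈ ts, dirLoop data t.1 t.2 (PySem.List.pyRange 0 4 1) = true := by
  intro ts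
  induction ts with
  | nil => simp [teachLoop]
  | cons t rest ih =>
    obtain ⟨tx, ty⟩ := t
    simp only [teachLoop]
    split
    · rename_i h
      rw [ih]
      constructor
      · intro hall t ht
        rcases List.mem_cons.mp ht with rfl | ht'
        · exact h
        · exact hall t ht'
      · intro hall t ht; exact hall t (List.mem_cons_of_mem _ ht)
    · simp_all

-- ========== A-side ray machinery ==========

def lineW (f : Int → String) (ok : Int → Prop) (t : Int) : Prop :=
  ∃ k : Int, 1 ≤ k ∧ ok (t+k) ∧ f (t+k) = "S" ∧
    ∀ j : Int, 1 ≤ j → j < k → ok (t+j) ∧ f (t+j) ≠ "O"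
def lineS (f : Int → String) (ok : Int → Prop) (t : Int) : Prop :=
  ∃ k : Int, 1 ≤ k ∧ ok (t+k) ∧ f (t+k) = "S" ∧
    ∀ j : Int, 1 ≤ j → j < k → ok (t+j) ∧ f (t+j) ≠ "O" ∧ f (t+j) ≠ "S"

lemma lineW_iff_lineS (f : Int → String) (ok : Int → Prop) (t : Int) :
    lineW f ok t ↔ lineS f ok t := by
  constructor
  · rintro ⟨k, hk1, hok, hS, hmid⟩
    have hex : ∃ m : Nat, 1 ≤ (m : Int) ∧ (m : Int) ≤ k ∧ f (t + m) = "S" :=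
      ⟨k.toNat, by omega, by omega, by rwa [Int.toNat_of_nonneg (by omega)]⟩
    classical
    set m := Nat.find hex with hm
    obtain ⟨hm1, hmk, hmS⟩ := Nat.find_spec hex
    have hmin := fun (j : Nat) (hj : j < m) => Nat.find_min hex hj
    refine ⟨(m : Int), hm1, ?_, hmS, ?_⟩
    · rcases eq_or_lt_of_le hmk with heq | hlt
      · rw [heq]; exact hok
      · exact (hmid m hm1 hlt).1
    · intro j hj1 hjm
      refine ⟨(hmid j hj1 (by omega)).1, (hmid j hj1 (by omega)).2, ?_⟩
      intro hjS
      have : j = ((j.toNat : Nat) : Int) := by omega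
      exact hmin j.toNat (by omega) ⟨by omega, by omega, by rw [← this]; exact hjS⟩
  · rintro ⟨k, hk1, hok, hS, hmid⟩
    exact ⟨k, hk1, hok, hS, fun j h1 h2 => ⟨(hmid j h1 h2).1, (hmid j h1 h2).2.1⟩⟩

lemma check1dir_false_iff (data : List (List String)) (dx dy : Int) :
    ∀ (fuel : Nat) (x y : Int),
      check1dir data dx dy fuel x y = false ↔
      ∃ m : Nat, m < fuel ∧ inG (x + m*dx) (y + m*dy) ∧ cellAt data (x + m*dx) (y + m*dy) = "S" ∧
        ∀ j : Nat, j < m → inG (x + j*dx) (y + j*dy) ∧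
          cellAt data (x + j*dx) (y + j*dy) ≠ "S" ∧ cellAt data (x + j*dx) (y + j*dy) ≠ "O" := by
  intro fuel
  induction fuel with
  | zero => intro x y; simp [check1dir]
  | succ fuel ih =>
    intro x y
    rw [check1dir]
    by_cases hg : 0 ≤ x ∧ x < 4 ∧ 0 ≤ y ∧ y < 4
    · rw [if_pos hg]
      by_cases hS : PySem.List.pyGetD (PySem.List.pyGetD data x []) y "" = "S"
      · rw [if_pos (by simpa using hS)]
        refine ⟨fun _ => ⟨0, by omega, by simpa [inG] using hg, by simpa [cellAt] using hS, by omega⟩, fun _ => rfl⟩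
      · rw [if_neg (by simpa using hS)]
        by_cases hO : PySem.List.pyGetD (PySem.List.pyGetD data x []) y "" = "O"
        · rw [if_pos (by simpa using hO)]
          constructor
          · intro h; cases h
          · rintro ⟨m, _, _, hmS, hmid⟩
            rcases Nat.eq_zero_or_pos m with rfl | hm
            · exact absurd (by simpa [cellAt] using hmS) hS
            · exact absurd (by simpa [cellAt] using hO) (hmid 0 hm).2.2
        · rw [if_neg (by simpa using hO)]
          rw [ih (x+dx) (y+dy)]
          constructor
          · rintro ⟨m, hm, hG, hcS, hmid⟩
            refine ⟨m+1, by omega, ?_, ?_, ?_⟩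
            · have : x + dx + (m:Int)*dx = x + ((m:Int)+1)*dx := by ring
              have h2 : y + dy + (m:Int)*dy = y + ((m:Int)+1)*dy := by ring
              push_cast
              rw [← this, ← h2]; exact hG
            · push_cast
              have : x + ((m:Int)+1)*dx = x + dx + (m:Int)*dx := by ring
              have h2 : y + ((m:Int)+1)*dy = y + dy + (m:Int)*dy := by ring
              rw [this, h2]; exact hcS
            · intro j hj
              rcases Nat.eq_zero_or_pos j with rfl | hjpos
              · simpa [inG, cellAt, hS, hO] using hg
              · obtain ⟨j', rfl⟩ : ∃ j', j = j' + 1 := ⟨j - 1, by omega⟩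
                have e1 : x + ((j':Int)+1)*dx = x + dx + (j':Int)*dx := by ring
                have e2 : y + ((j':Int)+1)*dy = y + dy + (j':Int)*dy := by ring
                push_cast
                rw [e1, e2]
                exact hmid j' (by omega)
          · rintro ⟨m, hm, hG, hcS, hmid⟩
            rcases Nat.eq_zero_or_pos m with rfl | hmpos
            · exact absurd (by simpa [cellAt] using hcS) hS
            · obtain ⟨m', rfl⟩ : ∃ m', m = m' + 1 := ⟨m - 1, by omega⟩
              have e1 : x + ((m':Int)+1)*dx = x + dx + (m':Int)*dx := by ring
              have e2 : y + ((m':Int)+1)*dy = y + dy + (m':Int)*dy := by ring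
              refine ⟨m', by omega, ?_, ?_, ?_⟩
              · rw [← e1, ← e2]; push_cast at hG ⊢; exact hG
              · push_cast at hcS ⊢
                have : x + dx + (m':Int)*dx = x + ((m':Int)+1)*dx := by ring
                have h2 : y + dy + (m':Int)*dy = y + ((m':Int)+1)*dy := by ring
                rw [this, h2]; exact hcS
              · intro j hj
                have := hmid (j+1) (by omega)
                push_cast at this ⊢
                have e3 : x + ((j:Int)+1)*dx = x + dx + (j:Int)*dx := by ring
                have e4 : y + ((j:Int)+1)*dy = y + dy + (j:Int)*dy := by ring
                rw [e3, e4] at this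
                exact this
    · rw [if_neg hg]
      constructor
      · intro h; cases h
      · rintro ⟨m, _, hG, _, hmid⟩
        rcases Nat.eq_zero_or_pos m with rfl | hm
        · exact absurd (by simpa [inG] using hG) hg
        · exact absurd (by simpa [inG] using (hmid 0 hm).1) hg

lemma check1dir_line (data : List (List String)) (dx dy tx ty t : Int)
    (f : Int → String) (ok : Int → Prop)
    (hdir : (dx = 0 ∧ (dy = 1 ∨ dy = -1)) ∨ (dy = 0 ∧ (dx = 1 ∨ dx = -1)))
    (hf : ∀ k : Int, f (t + k) = cellAt data (tx + k*dx) (ty + k*dy))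
    (hok : ∀ k : Int, ok (t + k) ↔ inG (tx + k*dx) (ty + k*dy)) :
    check1dir data dx dy 8 (tx + dx) (ty + dy) = false ↔ lineS f ok t := by
  have e1 : ∀ m : Int, tx + dx + m*dx = tx + (m+1)*dx := by intro m; ring
  have e2 : ∀ m : Int, ty + dy + m*dy = ty + (m+1)*dy := by intro m; ring
  rw [check1dir_false_iff]
  constructor
  · rintro ⟨m, hm8, hG, hcS, hmid⟩
    rw [e1, e2] at hG hcS
    refine ⟨(m:Int)+1, by omega, (hok _).mpr hG, by rw [hf]; exact hcS, ?_⟩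
    intro j hj1 hjk
    obtain ⟨i, hi, him⟩ : ∃ i : Nat, (i:Int) = j - 1 ∧ i < m := ⟨(j-1).toNat, by omega, by omega⟩
    obtain ⟨hiG, hiS, hiO⟩ := hmid i him
    rw [e1, e2] at hiG hiS hiO
    rw [hi, show j - 1 + 1 = j from by ring] at hiG hiS hiO
    exact ⟨(hok _).mpr hiG, by rw [hf]; exact hiO, by rw [hf]; exact hiS⟩
  · rintro ⟨k, hk1, hokk, hfS, hmid⟩
    have hGk := (hok k).mp hokk
    have hG1 : inG (tx + 1*dx) (ty + 1*dy) := by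
      rcases eq_or_lt_of_le hk1 with heq | hlt
      · rw [← heq] at hGk; exact hGk
      · exact (hok 1).mp (hmid 1 le_rfl hlt).1
    have hkle : k ≤ 4 := by
      unfold inG at hGk hG1
      rcases hdir with ⟨rfl, rfl | rfl⟩ | ⟨rfl, rfl | rfl⟩ <;> omega
    have ek : (((k-1).toNat : Nat) : Int) = k - 1 := by omega
    have ek1 : k - 1 + 1 = k := by ring
    refine ⟨(k-1).toNat, by omega, ?_, ?_, ?_⟩
    · rw [e1, e2, ek, ek1]; exact hGk
    · rw [e1, e2, ek, ek1, ← hf]; exact hfS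
    · intro j hj
      obtain ⟨hjG, hjO, hjS⟩ := hmid ((j:Int)+1) (by omega) (by omega)
      rw [hok] at hjG
      rw [hf] at hjO hjS
      rw [e1, e2]
      exact ⟨hjG, hjS, hjO⟩

lemma seen1_iff (g : Int → String) (C : Prop) (t : Int) :
    (lineW g (fun z => C ∧ 0 ≤ z ∧ z < 4) t ∨
     lineW (fun z => g (2*t - z)) (fun z => C ∧ 0 ≤ (2*t - z) ∧ (2*t - z) < 4) t) ↔
    ∃ s : Int, (C ∧ 0 ≤ s ∧ s < 4) ∧ g s = "S" ∧ s ≠ t ∧ -1 ≤ t ∧ t ≤ 4 ∧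
      ∀ y : Int, min s t < y → y < max s t → g y ≠ "O" := by
  constructor
  · rintro (⟨k, hk1, ⟨hC, h0, h4⟩, hS, hmid⟩ | ⟨k, hk1, hokk, hS, hmid⟩)
    · have ht1 : 0 ≤ t + 1 := by
        rcases eq_or_lt_of_le hk1 with heq | hlt
        · rw [← heq] at h0; exact h0
        · exact (hmid 1 le_rfl hlt).1.2.1
      refine ⟨t + k, ⟨hC, h0, h4⟩, hS, by omega, by omega, by omega, ?_⟩
      intro y hy1 hy2
      have := (hmid (y - t) (by omega) (by omega)).2
      rwa [show t + (y - t) = y from by ring] at this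
    · beta_reduce at hokk hS hmid
      rw [show 2*t - (t+k) = t - k from by ring] at hokk hS
      obtain ⟨hC, h0, h4⟩ := hokk
      have ht1 : t - 1 < 4 := by
        rcases eq_or_lt_of_le hk1 with heq | hlt
        · omega
        · have := (hmid 1 le_rfl hlt).1.2.2
          rwa [show 2*t - (t+1) = t - 1 from by ring] at this
      refine ⟨t - k, ⟨hC, h0, h4⟩, hS, by omega, by omega, by omega, ?_⟩
      intro y hy1 hy2
      have := (hmid (t - y) (by omega) (by omega)).2
      rwa [show 2*t - (t + (t - y)) = y from by ring] at this
  · rintro ⟨s, ⟨hC, h0, h4⟩, hS, hne, htlo, hthi, hbet⟩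
    rcases lt_or_gt_of_ne hne with hlt | hgt
    · right
      refine ⟨t - s, by omega, ?_, ?_, ?_⟩
      · beta_reduce; rw [show 2*t - (t + (t - s)) = s from by ring]; exact ⟨hC, h0, h4⟩
      · beta_reduce; rw [show 2*t - (t + (t - s)) = s from by ring]; exact hS
      · intro j hj1 hjk
        beta_reduce
        rw [show 2*t - (t + j) = t - j from by ring]
        exact ⟨⟨hC, by omega, by omega⟩, hbet (t - j) (by omega) (by omega)⟩
    · left
      refine ⟨s - t, by omega, ?_, ?_, ?_⟩
      · rw [show t + (s - t) = s from by ring]; exact ⟨hC, h0, h4⟩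
      · rw [show t + (s - t) = s from by ring]; exact hS
      · intro j hj1 hjk
        exact ⟨⟨hC, by omega, by omega⟩, hbet (t + j) (by omega) (by omega)⟩

lemma lineW_congr (f : Int → String) (ok ok' : Int → Prop) (t : Int)
    (h : ∀ z, ok z ↔ ok' z) : lineW f ok t ↔ lineW f ok' t := by
  unfold lineW
  constructor
  · rintro ⟨k, h1, h2, h3, h4⟩
    exact ⟨k, h1, (h _).mp h2, h3, fun j a b => ⟨(h _).mp (h4 j a b).1, (h4 j a b).2⟩⟩
  · rintro ⟨k, h1, h2, h3, h4⟩
    exact ⟨k, h1, (h _).mpr h2, h3, fun j a b => ⟨(h _).mpr (h4 j a b).1, (h4 j a b).2⟩⟩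

set_option maxHeartbeats 1000000 in
lemma dirLoop_false_iff (data : List (List String)) (tx ty : Int) :
    dirLoop data tx ty (PySem.List.pyRange 0 4 1) = false ↔ SeenA data tx ty := by
  have hcell : ∀ a b a' b' : Int, a = a' → b = b' → cellAt data a b = cellAt data a' b' := by
    intro a b a' b' h1 h2; rw [h1, h2]
  have hinG : ∀ a b a' b' : Int, a = a' → b = b' → (inG a b ↔ inG a' b') := by
    intro a b a' b' h1 h2; rw [h1, h2]
  have Lup := check1dir_line data (-1) 0 tx ty tx
    (fun z => cellAt data (2*tx - z) ty) (fun z => inG (2*tx - z) ty)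
    (by norm_num) (fun k => hcell _ _ _ _ (by ring) (by ring)) (fun k => hinG _ _ _ _ (by ring) (by ring))
  have Ldown := check1dir_line data 1 0 tx ty tx
    (fun z => cellAt data z ty) (fun z => inG z ty)
    (by norm_num) (fun k => hcell _ _ _ _ (by ring) (by ring)) (fun k => hinG _ _ _ _ (by ring) (by ring))
  have Lleft := check1dir_line data 0 (-1) tx ty ty
    (fun z => cellAt data tx (2*ty - z)) (fun z => inG tx (2*ty - z))
    (by norm_num) (fun k => hcell _ _ _ _ (by ring) (by ring)) (fun k => hinG _ _ _ _ (by ring) (by ring))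
  have Lright := check1dir_line data 0 1 tx ty ty
    (fun z => cellAt data tx z) (fun z => inG tx z)
    (by norm_num) (fun k => hcell _ _ _ _ (by ring) (by ring)) (fun k => hinG _ _ _ _ (by ring) (by ring))
  have hR : PySem.List.pyRange 0 4 1 = [(0:Int), 1, 2, 3] := by decide
  have g0x : PySem.List.pyGetD [(-1:Int), 1, 0, 0] 0 0 = -1 := by decide
  have g0y : PySem.List.pyGetD [(0:Int), 0, -1, 1] 0 0 = 0 := by decide
  have g1x : PySem.List.pyGetD [(-1:Int), 1, 0, 0] 1 0 = 1 := by decide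
  have g1y : PySem.List.pyGetD [(0:Int), 0, -1, 1] 1 0 = 0 := by decide
  have g2x : PySem.List.pyGetD [(-1:Int), 1, 0, 0] 2 0 = 0 := by decide
  have g2y : PySem.List.pyGetD [(0:Int), 0, -1, 1] 2 0 = -1 := by decide
  have g3x : PySem.List.pyGetD [(-1:Int), 1, 0, 0] 3 0 = 0 := by decide
  have g3y : PySem.List.pyGetD [(0:Int), 0, -1, 1] 3 0 = 1 := by decide
  rw [hR]
  simp only [dirLoop, g0x, g0y, g1x, g1y, g2x, g2y, g3x, g3y]
  unfold SeenA
  rw [← seen1_iff (fun z => cellAt data tx z) (0 ≤ tx ∧ tx < 4) ty,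
      ← seen1_iff (fun z => cellAt data z ty) (0 ≤ ty ∧ ty < 4) tx]
  rw [lineW_congr (fun z => cellAt data tx z) _ (fun z => inG tx z) ty (by intro z; unfold inG; tauto),
      lineW_congr (fun z => cellAt data tx (2*ty - z)) _ (fun z => inG tx (2*ty - z)) ty (by intro z; beta_reduce; unfold inG; tauto),
      lineW_congr (fun z => cellAt data z ty) _ (fun z => inG z ty) tx (by intro z; unfold inG; tauto),
      lineW_congr (fun z => cellAt data (2*tx - z) ty) _ (fun z => inG (2*tx - z) ty) tx (by intro z; beta_reduce; unfold inG; tauto)]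
  rw [(lineW_iff_lineS (fun z => cellAt data tx z) (fun z => inG tx z) ty).trans Lright.symm,
      (lineW_iff_lineS (fun z => cellAt data tx (2*ty - z)) (fun z => inG tx (2*ty - z)) ty).trans Lleft.symm,
      (lineW_iff_lineS (fun z => cellAt data z ty) (fun z => inG z ty) tx).trans Ldown.symm,
      (lineW_iff_lineS (fun z => cellAt data (2*tx - z) ty) (fun z => inG (2*tx - z) ty) tx).trans Lup.symm]
  cases h0 : check1dir data (-1) 0 8 (tx + -1) (ty + 0) <;>
    cases h1 : check1dir data 1 0 8 (tx + 1) (ty + 0) <;>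
      cases h2 : check1dir data 0 (-1) 8 (tx + 0) (ty + -1) <;>
        cases h3 : check1dir data 0 1 8 (tx + 0) (ty + 1) <;>
          simp

lemma A_false_iff (teachers : List (Int × Int)) (data : List (List String)) (b : Bool) :
    check_std teachers data b = false ↔ ∃ t ∈ teachers, SeenA data t.1 t.2 := by
  unfold check_std
  constructor
  · intro hA
    by_contra hno
    push_neg at hno
    have : teachLoop data teachers = true := by
      rw [teachLoop_true_iff]
      intro t ht
      cases hdl : dirLoop data t.1 t.2 (PySem.List.pyRange 0 4 1) with
      | true => rfl
      | false => exact absurd ((dirLoop_false_iff data t.1 t.2).mp hdl) (hno t ht)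
    rw [this] at hA; cases hA
  · rintro ⟨t, ht, hseen⟩
    cases hA : teachLoop data teachers with
    | false => rfl
    | true =>
      have := (teachLoop_true_iff data teachers).mp hA t ht
      rw [(dirLoop_false_iff data t.1 t.2).mpr hseen] at this
      cases this

-- ========== B-side ray machinery ==========

def mlineW (m : Int → Prop) (g : Int → String) (ok : Int → Prop) (s : Int) : Prop :=
  ∃ k : Int, 1 ≤ k ∧ ok (s+k) ∧ m (s+k) ∧
    ∀ j : Int, 1 ≤ j → j < k → ok (s+j) ∧ g (s+j) ≠ "O"
def mlineS (m : Int → Prop) (g : Int → String) (ok : Int → Prop) (s : Int) : Prop :=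
  ∃ k : Int, 1 ≤ k ∧ ok (s+k) ∧ m (s+k) ∧
    ∀ j : Int, 1 ≤ j → j < k → ok (s+j) ∧ g (s+j) ≠ "O" ∧ ¬ m (s+j)

lemma mlineW_iff_mlineS (m : Int → Prop) (g : Int → String) (ok : Int → Prop) (s : Int) :
    mlineW m g ok s ↔ mlineS m g ok s := by
  constructor
  · rintro ⟨k, hk1, hok, hm, hmid⟩
    classical
    have hex : ∃ n : Nat, 1 ≤ (n : Int) ∧ (n : Int) ≤ k ∧ m (s + n) :=
      ⟨k.toNat, by omega, by omega, by rwa [Int.toNat_of_nonneg (by omega)]⟩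
    set n := Nat.find hex with hn
    obtain ⟨hn1, hnk, hnm⟩ := Nat.find_spec hex
    have hmin := fun (j : Nat) (hj : j < n) => Nat.find_min hex hj
    refine ⟨(n : Int), hn1, ?_, hnm, ?_⟩
    · rcases eq_or_lt_of_le hnk with heq | hlt
      · rw [heq]; exact hok
      · exact (hmid n hn1 hlt).1
    · intro j hj1 hjn
      refine ⟨(hmid j hj1 (by omega)).1, (hmid j hj1 (by omega)).2, ?_⟩
      intro hjm
      have : j = ((j.toNat : Nat) : Int) := by omega
      exact hmin j.toNat (by omega) ⟨by omega, by omega, by rw [← this]; exact hjm⟩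
  · rintro ⟨k, hk1, hok, hm, hmid⟩
    exact ⟨k, hk1, hok, hm, fun j h1 h2 => ⟨(hmid j h1 h2).1, (hmid j h1 h2).2.1⟩⟩

lemma rayHits_true_iff (tset : PySem.Set (Int × Int)) (data : List (List String)) (dx dy : Int) :
    ∀ (fuel : Nat) (x y : Int),
      rayHits tset data dx dy fuel x y = true ↔
      ∃ m : Nat, m < fuel ∧ okB data (x + m*dx) (y + m*dy) ∧
        PySem.Set.contains tset (x + m*dx, y + m*dy) = true ∧
        ∀ j : Nat, j < m → okB data (x + j*dx) (y + j*dy) ∧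
          PySem.Set.contains tset (x + j*dx, y + j*dy) = false ∧
          cellAt data (x + j*dx) (y + j*dy) ≠ "O" := by
  intro fuel
  induction fuel with
  | zero => intro x y; simp [rayHits]
  | succ fuel ih =>
    intro x y
    rw [rayHits]
    by_cases hg : 0 ≤ x ∧ x < (data.length : Int) ∧ 0 ≤ y ∧ y < ((PySem.List.pyGetD data x []).length : Int)
    · rw [if_pos hg]
      by_cases hT : PySem.Set.contains tset (x, y) = true
      · rw [if_pos hT]
        refine ⟨fun _ => ⟨0, by omega, by simpa [okB] using hg, by simpa using hT, by omega⟩, fun _ => rfl⟩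
      · rw [if_neg hT]
        by_cases hO : PySem.List.pyGetD (PySem.List.pyGetD data x []) y "" = "O"
        · rw [if_pos (by simpa using hO)]
          constructor
          · intro h; cases h
          · rintro ⟨n, _, _, hnm, hmid⟩
            rcases Nat.eq_zero_or_pos n with rfl | hn
            · exact absurd (by simpa using hnm) hT
            · exact absurd (by simpa [cellAt] using hO) (hmid 0 hn).2.2
        · rw [if_neg (by simpa using hO)]
          rw [ih (x+dx) (y+dy)]
          constructor
          · rintro ⟨n, hn, hG, hnm, hmid⟩
            refine ⟨n+1, by omega, ?_, ?_, ?_⟩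
            · have e1 : x + dx + (n:Int)*dx = x + ((n:Int)+1)*dx := by ring
              have e2 : y + dy + (n:Int)*dy = y + ((n:Int)+1)*dy := by ring
              push_cast
              rw [← e1, ← e2]; exact hG
            · push_cast
              have e1 : x + ((n:Int)+1)*dx = x + dx + (n:Int)*dx := by ring
              have e2 : y + ((n:Int)+1)*dy = y + dy + (n:Int)*dy := by ring
              rw [e1, e2]; exact hnm
            · intro j hj
              rcases Nat.eq_zero_or_pos j with rfl | hjpos
              · refine ⟨by simpa [okB] using hg, by simpa using hT, by simpa [cellAt] using hO⟩
              · obtain ⟨j', rfl⟩ : ∃ j', j = j' + 1 := ⟨j - 1, by omega⟩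
                have e1 : x + ((j':Int)+1)*dx = x + dx + (j':Int)*dx := by ring
                have e2 : y + ((j':Int)+1)*dy = y + dy + (j':Int)*dy := by ring
                push_cast
                rw [e1, e2]
                exact hmid j' (by omega)
          · rintro ⟨n, hn, hG, hnm, hmid⟩
            rcases Nat.eq_zero_or_pos n with rfl | hnpos
            · exact absurd (by simpa using hnm) hT
            · obtain ⟨n', rfl⟩ : ∃ n', n = n' + 1 := ⟨n - 1, by omega⟩
              have e1 : x + ((n':Int)+1)*dx = x + dx + (n':Int)*dx := by ring
              have e2 : y + ((n':Int)+1)*dy = y + dy + (n':Int)*dy := by ring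
              refine ⟨n', by omega, ?_, ?_, ?_⟩
              · push_cast at hG ⊢; rw [← e1, ← e2]; exact hG
              · push_cast at hnm ⊢
                rw [show x + dx + (n':Int)*dx = x + ((n':Int)+1)*dx from by ring,
                    show y + dy + (n':Int)*dy = y + ((n':Int)+1)*dy from by ring]
                exact hnm
              · intro j hj
                have := hmid (j+1) (by omega)
                push_cast at this ⊢
                have e3 : x + ((j:Int)+1)*dx = x + dx + (j:Int)*dx := by ring
                have e4 : y + ((j:Int)+1)*dy = y + dy + (j:Int)*dy := by ring
                rw [e3, e4] at this
                exact this
    · rw [if_neg hg]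
      constructor
      · intro h; cases h
      · rintro ⟨n, _, hG, _, hmid⟩
        rcases Nat.eq_zero_or_pos n with rfl | hn
        · exact absurd (by simpa [okB] using hG) hg
        · exact absurd (by simpa [okB] using (hmid 0 hn).1) hg

lemma rayHits_line (tset : PySem.Set (Int × Int)) (data : List (List String))
    (dx dy sx sy s : Int) (fuel : Nat)
    (m : Int → Prop) (g : Int → String) (ok : Int → Prop)
    (hf : ∀ k : Int, g (s + k) = cellAt data (sx + k*dx) (sy + k*dy))
    (hok : ∀ k : Int, ok (s + k) ↔ okB data (sx + k*dx) (sy + k*dy))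
    (hm : ∀ k : Int, m (s + k) ↔ PySem.Set.contains tset (sx + k*dx, sy + k*dy) = true)
    (hbound : ∀ k : Int, 1 ≤ k → ok (s + k) → k < (fuel : Int)) :
    rayHits tset data dx dy fuel (sx + dx) (sy + dy) = true ↔ mlineS m g ok s := by
  have e1 : ∀ n : Int, sx + dx + n*dx = sx + (n+1)*dx := by intro n; ring
  have e2 : ∀ n : Int, sy + dy + n*dy = sy + (n+1)*dy := by intro n; ring
  rw [rayHits_true_iff]
  constructor
  · rintro ⟨n, hnf, hG, hnm, hmid⟩
    rw [e1, e2] at hG hnm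
    refine ⟨(n:Int)+1, by omega, (hok _).mpr hG, (hm _).mpr hnm, ?_⟩
    intro j hj1 hjk
    obtain ⟨i, hi, hin⟩ : ∃ i : Nat, (i:Int) = j - 1 ∧ i < n := ⟨(j-1).toNat, by omega, by omega⟩
    obtain ⟨hiG, hiT, hiO⟩ := hmid i hin
    rw [e1, e2] at hiG hiT hiO
    rw [hi, show j - 1 + 1 = j from by ring] at hiG hiT hiO
    refine ⟨(hok _).mpr hiG, by rw [hf]; exact hiO, ?_⟩
    intro hjm
    rw [(hm j).mp hjm] at hiT; cases hiT
  · rintro ⟨k, hk1, hokk, hkm, hmid⟩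
    have hkf : k < (fuel : Int) := hbound k hk1 hokk
    have ek : (((k-1).toNat : Nat) : Int) = k - 1 := by omega
    have ek1 : k - 1 + 1 = k := by ring
    refine ⟨(k-1).toNat, by omega, ?_, ?_, ?_⟩
    · rw [e1, e2, ek, ek1]; exact (hok k).mp hokk
    · rw [e1, e2, ek, ek1]; exact (hm k).mp hkm
    · intro j hj
      obtain ⟨hjok, hjO, hjm⟩ := hmid ((j:Int)+1) (by omega) (by omega)
      rw [e1, e2]
      refine ⟨(hok _).mp hjok, ?_, by rw [← hf]; exact hjO⟩
      cases hc : PySem.Set.contains tset (sx + ((j:Int)+1)*dx, sy + ((j:Int)+1)*dy) with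
      | false => rfl
      | true => exact absurd ((hm _).mpr hc) hjm

lemma mseen1_iff (m : Int → Prop) (g : Int → String) (ok : Int → Prop) (s : Int) :
    (mlineW m g ok s ∨
     mlineW (fun z => m (2*s - z)) (fun z => g (2*s - z)) (fun z => ok (2*s - z)) s) ↔
    ∃ t : Int, ok t ∧ m t ∧ t ≠ s ∧ ∀ y : Int, min s t < y → y < max s t → ok y ∧ g y ≠ "O" := by
  constructor
  · rintro (⟨k, hk1, hok, hm', hmid⟩ | ⟨k, hk1, hok, hm', hmid⟩)
    · refine ⟨s + k, hok, hm', by omega, ?_⟩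
      intro y hy1 hy2
      have := hmid (y - s) (by omega) (by omega)
      rwa [show s + (y - s) = y from by ring] at this
    · beta_reduce at hok hm' hmid
      rw [show 2*s - (s+k) = s - k from by ring] at hok hm'
      refine ⟨s - k, hok, hm', by omega, ?_⟩
      intro y hy1 hy2
      have := hmid (s - y) (by omega) (by omega)
      rwa [show 2*s - (s + (s - y)) = y from by ring] at this
  · rintro ⟨t, hok, hm', hne, hbet⟩
    rcases lt_or_gt_of_ne hne with hlt | hgt
    · right
      refine ⟨s - t, by omega, ?_, ?_, ?_⟩
      · beta_reduce; rw [show 2*s - (s + (s - t)) = t from by ring]; exact hok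
      · beta_reduce; rw [show 2*s - (s + (s - t)) = t from by ring]; exact hm'
      · intro j hj1 hjk
        beta_reduce
        rw [show 2*s - (s + j) = s - j from by ring]
        exact hbet (s - j) (by omega) (by omega)
    · left
      refine ⟨t - s, by omega, ?_, ?_, ?_⟩
      · rw [show s + (t - s) = t from by ring]; exact hok
      · rw [show s + (t - s) = t from by ring]; exact hm'
      · intro j hj1 hjk
        exact hbet (s + j) (by omega) (by omega)

lemma mem_le_maxRowLen (data : List (List String)) :
    ∀ r ∈ data, r.length ≤ maxRowLen data := by
  induction data with
  | nil => intro r h; cases h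
  | cons a l ih =>
    intro r h
    rcases List.mem_cons.mp h with rfl | h'
    · simp [maxRowLen]
    · have := ih r h'
      simp only [maxRowLen, List.foldr_cons] at this ⊢
      omega

lemma pyGetD_len_le_maxRowLen (data : List (List String)) (x : Int) :
    (PySem.List.pyGetD data x []).length ≤ maxRowLen data := by
  unfold PySem.List.pyGetD
  cases h : PySem.List.pyGet? data x with
  | none => simp
  | some r =>
    have := PySem.List.mem_of_pyGet?_eq_some data h
    simpa using mem_le_maxRowLen data r this

lemma pyGetD_nonneg_getD (data : List (List String)) (x : Int) (hx : 0 ≤ x) :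
    PySem.List.pyGetD data x [] = data.getD x.toNat [] := by
  unfold PySem.List.pyGetD
  rw [PySem.List.pyGet?_of_nonneg data hx]
  rw [List.getD_eq_getElem?_getD]

-- every grid cell exists on a full board
lemma gridcell_okB (data : List (List String)) (x y : Int)
    (hfull : fullGrid data) (hx : 0 ≤ x ∧ x < 4) (hy : 0 ≤ y ∧ y < 4) :
    okB data x y := by
  obtain ⟨hlen, hrows⟩ := hfull
  have hxl : x.toNat < data.length := by omega
  have hrow : PySem.List.pyGetD data x [] = data[x.toNat] := by
    rw [pyGetD_nonneg_getD data x hx.1, List.getD_eq_getElem?_getD,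
        List.getElem?_eq_getElem hxl]
    rfl
  have h4 : x.toNat < (data.take 4).length := by
    simp only [List.length_take]
    omega
  have hmem : data[x.toNat] ∈ data.take 4 := by
    have hmem0 : (data.take 4)[x.toNat] ∈ data.take 4 := List.getElem_mem h4
    rwa [List.getElem_take] at hmem0
  have := hrows _ hmem
  refine ⟨hx.1, by omega, hy.1, ?_⟩
  rw [hrow]; omega

set_option maxHeartbeats 2000000 in
lemma dirs_any_iff (teachers : List (Int × Int)) (data : List (List String)) (sx sy : Int)
    (hs : okB data sx sy) :
    ([((-1 : Int), (0 : Int)), (1, 0), (0, -1), (0, 1)].any fun d =>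
        rayHits (PySem.Set.ofList teachers) data d.1 d.2 (bFuel data) (sx + d.1) (sy + d.2)) = true ↔
    VertHit teachers data sx sy ∨ HorizHit teachers data sx sy := by
  obtain ⟨hsx0, hsxl, hsy0, hsyr⟩ := hs
  have hrowm := pyGetD_len_le_maxRowLen data sx
  have hcell : ∀ a b a' b' : Int, a = a' → b = b' → cellAt data a b = cellAt data a' b' := by
    intro a b a' b' h1 h2; rw [h1, h2]
  have hok : ∀ a b a' b' : Int, a = a' → b = b' → (okB data a b ↔ okB data a' b') := by
    intro a b a' b' h1 h2; rw [h1, h2]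
  have hmm : ∀ a b a' b' : Int, a = a' → b = b' →
      (((a, b) : Int × Int) ∈ teachers ↔ PySem.Set.contains (PySem.Set.ofList teachers) (a', b') = true) := by
    intro a b a' b' h1 h2
    rw [h1, h2, PySem.Set.contains_iff, PySem.Set.mem_ofList]
  have Ldown := rayHits_line (PySem.Set.ofList teachers) data 1 0 sx sy sx (bFuel data)
    (fun z => ((z, sy) : Int × Int) ∈ teachers) (fun z => cellAt data z sy) (fun z => okB data z sy)
    (fun k => hcell _ _ _ _ (by ring) (by ring))
    (fun k => hok _ _ _ _ (by ring) (by ring))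
    (fun k => hmm _ _ _ _ (by ring) (by ring))
    (by intro k hk1 hokk
        obtain ⟨h1, h2, h3, h4⟩ := hokk
        unfold bFuel; push_cast; omega)
  have Lup := rayHits_line (PySem.Set.ofList teachers) data (-1) 0 sx sy sx (bFuel data)
    (fun z => ((2*sx - z, sy) : Int × Int) ∈ teachers) (fun z => cellAt data (2*sx - z) sy)
    (fun z => okB data (2*sx - z) sy)
    (fun k => hcell _ _ _ _ (by ring) (by ring))
    (fun k => hok _ _ _ _ (by ring) (by ring))
    (fun k => hmm _ _ _ _ (by ring) (by ring))
    (by intro k hk1 hokk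
        beta_reduce at hokk
        rw [show 2*sx - (sx + k) = sx - k from by ring] at hokk
        obtain ⟨h1, h2, h3, h4⟩ := hokk
        unfold bFuel; push_cast; omega)
  have Lright := rayHits_line (PySem.Set.ofList teachers) data 0 1 sx sy sy (bFuel data)
    (fun z => ((sx, z) : Int × Int) ∈ teachers) (fun z => cellAt data sx z) (fun z => okB data sx z)
    (fun k => hcell _ _ _ _ (by ring) (by ring))
    (fun k => hok _ _ _ _ (by ring) (by ring))
    (fun k => hmm _ _ _ _ (by ring) (by ring))
    (by intro k hk1 hokk
        obtain ⟨h1, h2, h3, h4⟩ := hokk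
        unfold bFuel; push_cast; omega)
  have Lleft := rayHits_line (PySem.Set.ofList teachers) data 0 (-1) sx sy sy (bFuel data)
    (fun z => ((sx, 2*sy - z) : Int × Int) ∈ teachers) (fun z => cellAt data sx (2*sy - z))
    (fun z => okB data sx (2*sy - z))
    (fun k => hcell _ _ _ _ (by ring) (by ring))
    (fun k => hok _ _ _ _ (by ring) (by ring))
    (fun k => hmm _ _ _ _ (by ring) (by ring))
    (by intro k hk1 hokk
        beta_reduce at hokk
        rw [show 2*sy - (sy + k) = sy - k from by ring] at hokk
        obtain ⟨h1, h2, h3, h4⟩ := hokk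
        unfold bFuel; push_cast; omega)
  have hV : (mlineW (fun z => ((z, sy) : Int × Int) ∈ teachers) (fun z => cellAt data z sy)
        (fun z => okB data z sy) sx ∨
      mlineW (fun z => ((2*sx - z, sy) : Int × Int) ∈ teachers) (fun z => cellAt data (2*sx - z) sy)
        (fun z => okB data (2*sx - z) sy) sx) ↔ VertHit teachers data sx sy := by
    rw [mseen1_iff]; rfl
  have hH : (mlineW (fun z => ((sx, z) : Int × Int) ∈ teachers) (fun z => cellAt data sx z)
        (fun z => okB data sx z) sy ∨
      mlineW (fun z => ((sx, 2*sy - z) : Int × Int) ∈ teachers) (fun z => cellAt data sx (2*sy - z))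
        (fun z => okB data sx (2*sy - z)) sy) ↔ HorizHit teachers data sx sy := by
    rw [mseen1_iff]; rfl
  rw [← hV, ← hH,
      mlineW_iff_mlineS (fun z => ((z, sy) : Int × Int) ∈ teachers) _ _ sx,
      mlineW_iff_mlineS (fun z => ((2*sx - z, sy) : Int × Int) ∈ teachers) _ _ sx,
      mlineW_iff_mlineS (fun z => ((sx, z) : Int × Int) ∈ teachers) _ _ sy,
      mlineW_iff_mlineS (fun z => ((sx, 2*sy - z) : Int × Int) ∈ teachers) _ _ sy,
      ← Ldown, ← Lup, ← Lright, ← Lleft]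
  simp only [List.any_cons, List.any_nil, Bool.or_eq_true, Bool.or_false]
  tauto

lemma alt_false_iff (teachers : List (Int × Int)) (data : List (List String)) (b : Bool) :
    check_std_alt teachers data b = false ↔
    ∃ sx sy : Int, okB data sx sy ∧ cellAt data sx sy = "S" ∧
      (VertHit teachers data sx sy ∨ HorizHit teachers data sx sy) := by
  unfold check_std_alt
  rw [Bool.not_eq_false']
  simp only [List.any_eq_true, Bool.and_eq_true, beq_iff_eq]
  constructor
  · rintro ⟨p, hp, q, hq, hS, hdir⟩
    rw [PySem.List.mem_enumerate_iff] at hp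
    obtain ⟨i, hi, rfl⟩ := hp
    rw [PySem.List.mem_enumerate_iff] at hq
    obtain ⟨j, hj, rfl⟩ := hq
    simp only at hS hdir hj
    have hrow : PySem.List.pyGetD data ((i : Nat) : Int) [] = data[i] := by
      rw [PySem.List.pyGetD_natCast, List.getD_eq_getElem?_getD, List.getElem?_eq_getElem hi]
      rfl
    have hok : okB data (0 + (i : Int)) (0 + (j : Int)) := by
      refine ⟨by omega, by push_cast; omega, by omega, ?_⟩
      rw [show ((0:Int) + (i:Int)) = ((i : Nat) : Int) from by push_cast; ring, hrow]
      push_cast; omega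
    have hcellS : cellAt data (0 + (i : Int)) (0 + (j : Int)) = "S" := by
      unfold cellAt
      rw [show ((0:Int) + (i:Int)) = ((i : Nat) : Int) from by push_cast; ring, hrow,
          show ((0:Int) + (j:Int)) = ((j : Nat) : Int) from by push_cast; ring,
          PySem.List.pyGetD_natCast, List.getD_eq_getElem?_getD, List.getElem?_eq_getElem hj]
      exact hS
    refine ⟨0 + (i : Int), 0 + (j : Int), hok, hcellS, ?_⟩
    rw [← dirs_any_iff teachers data _ _ hok]
    simp only [List.any_eq_true]
    obtain ⟨d, hd, hray⟩ := hdir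
    exact ⟨d, hd, hray⟩
  · rintro ⟨sx, sy, hok, hS, hhit⟩
    obtain ⟨h1, h2, h3, h4⟩ := hok
    have hil : sx.toNat < data.length := by omega
    have hrow : PySem.List.pyGetD data sx [] = data[sx.toNat] := by
      rw [pyGetD_nonneg_getD data sx h1, List.getD_eq_getElem?_getD, List.getElem?_eq_getElem hil]
      rfl
    have hjl : sy.toNat < data[sx.toNat].length := by rw [hrow] at h4; omega
    refine ⟨((sx.toNat : Int), data[sx.toNat]), ?_, ((sy.toNat : Int), data[sx.toNat][sy.toNat]), ?_, ?_, ?_⟩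
    · rw [PySem.List.mem_enumerate_iff]
      exact ⟨sx.toNat, hil, by simp⟩
    · rw [PySem.List.mem_enumerate_iff]
      exact ⟨sy.toNat, hjl, by simp⟩
    · show data[sx.toNat][sy.toNat] = "S"
      unfold cellAt at hS
      rw [hrow, show sy = ((sy.toNat : Nat) : Int) from by omega, PySem.List.pyGetD_natCast,
          List.getD_eq_getElem?_getD, List.getElem?_eq_getElem hjl] at hS
      exact hS
    · have hVH := (dirs_any_iff teachers data sx sy ⟨h1, h2, h3, h4⟩).mpr hhit
      simp only [List.any_eq_true] at hVH ⊢
      obtain ⟨d, hd, hray⟩ := hVH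
      refine ⟨d, hd, ?_⟩
      simpa [show ((sx.toNat : Nat) : Int) = sx from by omega,
             show ((sy.toNat : Nat) : Int) = sy from by omega] using hray

-- ========== bridge between the two detection predicates, under Pre_ ==========

lemma student_in_grid (data : List (List String)) (sx sy : Int)
    (hnoS : noStudentOutside data) (hok : okB data sx sy) (hS : cellAt data sx sy = "S") :
    (0 ≤ sx ∧ sx < 4) ∧ (0 ≤ sy ∧ sy < 4) := by
  obtain ⟨h1, h2, h3, h4⟩ := hok
  obtain ⟨hbelow, hright⟩ := hnoS
  have hil : sx.toNat < data.length := by omega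
  have hrow : PySem.List.pyGetD data sx [] = data[sx.toNat] := by
    rw [pyGetD_nonneg_getD data sx h1, List.getD_eq_getElem?_getD, List.getElem?_eq_getElem hil]
    rfl
  have hjl : sy.toNat < data[sx.toNat].length := by rw [hrow] at h4; omega
  have hcell : data[sx.toNat][sy.toNat] = "S" := by
    unfold cellAt at hS
    rw [hrow, show sy = ((sy.toNat : Nat) : Int) from by omega, PySem.List.pyGetD_natCast,
        List.getD_eq_getElem?_getD, List.getElem?_eq_getElem hjl] at hS
    exact hS
  have hx4 : sx.toNat < 4 := by
    by_contra hge
    have hd : sx.toNat - 4 < (data.drop 4).length := by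
      simp only [List.length_drop]; omega
    have : (data.drop 4)[sx.toNat - 4] = data[sx.toNat] := by
      rw [List.getElem_drop]
      congr 1
      omega
    refine hbelow data[sx.toNat] ?_ data[sx.toNat][sy.toNat] (List.getElem_mem hjl) hcell
    rw [← this]
    exact List.getElem_mem hd
  have hy4 : sy.toNat < 4 := by
    by_contra hge
    have hmemrow : data[sx.toNat] ∈ data.take 4 := by
      have hm0 : (data.take 4)[sx.toNat]'(by simp only [List.length_take]; omega) ∈ data.take 4 :=
        List.getElem_mem _
      rwa [List.getElem_take] at hm0
    have hd : sy.toNat - 4 < (data[sx.toNat].drop 4).length := by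
      simp only [List.length_drop]; omega
    have heq : (data[sx.toNat].drop 4)[sy.toNat - 4] = data[sx.toNat][sy.toNat] := by
      rw [List.getElem_drop]
      congr 1
      omega
    refine hright data[sx.toNat] hmemrow data[sx.toNat][sy.toNat] ?_ hcell
    rw [← heq]
    exact List.getElem_mem hd
  omega

lemma bridge (teachers : List (Int × Int)) (data : List (List String)) (b : Bool)
    (hPre : Pre_check_std teachers data b) :
    (∃ t ∈ teachers, SeenA data t.1 t.2) ↔
    (∃ sx sy : Int, okB data sx sy ∧ cellAt data sx sy = "S" ∧
      (VertHit teachers data sx sy ∨ HorizHit teachers data sx sy)) := by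
  obtain ⟨hnear, hdata, hgrid⟩ := hPre
  constructor
  · rintro ⟨⟨tx, ty⟩, ht, hseen⟩
    rcases hseen with ⟨s, ⟨⟨htx0, htx4⟩, hs0, hs4⟩, hS, hne, hlo, hhi, hbet⟩ |
                      ⟨s, ⟨⟨hty0, hty4⟩, hs0, hs4⟩, hS, hne, hlo, hhi, hbet⟩
    · -- teacher row tx, student (tx, s), teacher column coordinate ty
      have hg : onGrid (tx, ty) := hnear _ ht (Or.inr ⟨htx0, htx4, hlo, hhi⟩)
      obtain ⟨-, -, hty0, hty4⟩ := hg
      obtain ⟨hfull, hnoS⟩ := hgrid ⟨(tx, ty), ht, ⟨htx0, htx4, hty0, hty4⟩⟩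
      refine ⟨tx, s, gridcell_okB data tx s hfull ⟨htx0, htx4⟩ ⟨hs0, hs4⟩, hS, Or.inr ?_⟩
      refine ⟨ty, gridcell_okB data tx ty hfull ⟨htx0, htx4⟩ ⟨hty0, hty4⟩, ht, Ne.symm hne, ?_⟩
      intro y hy1 hy2
      exact ⟨gridcell_okB data tx y hfull ⟨htx0, htx4⟩ ⟨by omega, by omega⟩, hbet y hy1 hy2⟩
    · -- teacher column ty, student (s, ty), teacher row coordinate tx
      have hg : onGrid (tx, ty) := hnear _ ht (Or.inl ⟨hlo, hhi, hty0, hty4⟩)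
      obtain ⟨htx0, htx4, -, -⟩ := hg
      obtain ⟨hfull, hnoS⟩ := hgrid ⟨(tx, ty), ht, ⟨htx0, htx4, hty0, hty4⟩⟩
      refine ⟨s, ty, gridcell_okB data s ty hfull ⟨hs0, hs4⟩ ⟨hty0, hty4⟩, hS, Or.inl ?_⟩
      refine ⟨tx, gridcell_okB data tx ty hfull ⟨htx0, htx4⟩ ⟨hty0, hty4⟩, ht, Ne.symm hne, ?_⟩
      intro y hy1 hy2
      exact ⟨gridcell_okB data y ty hfull ⟨by omega, by omega⟩ ⟨hty0, hty4⟩, hbet y hy1 hy2⟩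
  · rintro ⟨sx, sy, hok, hS, hhit⟩
    rcases hhit with ⟨u, hoku, hmem, hne, hbet⟩ | ⟨v, hokv, hmem, hne, hbet⟩
    · -- teacher (u, sy) on the student's column
      have honD : onData data (u, sy) := by
        obtain ⟨a1, a2, a3, a4⟩ := hoku
        refine ⟨a1, a2, a3, ?_⟩
        rw [← pyGetD_nonneg_getD data u a1]
        exact a4
      have hg : onGrid (u, sy) := by
        by_contra hng
        exact hdata _ hmem hng honD
      obtain ⟨hu0, hu4, hsy0, hsy4⟩ := hg
      obtain ⟨hfull, hnoS⟩ := hgrid ⟨(u, sy), hmem, ⟨hu0, hu4, hsy0, hsy4⟩⟩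
      obtain ⟨⟨hsx0, hsx4⟩, -⟩ := student_in_grid data sx sy hnoS hok hS
      refine ⟨(u, sy), hmem, Or.inr ?_⟩
      exact ⟨sx, ⟨⟨hsy0, hsy4⟩, hsx0, hsx4⟩, hS, Ne.symm hne, by omega, by omega,
        fun x hx1 hx2 => (hbet x hx1 hx2).2⟩
    · -- teacher (sx, v) on the student's row
      have honD : onData data (sx, v) := by
        obtain ⟨a1, a2, a3, a4⟩ := hokv
        refine ⟨a1, a2, a3, ?_⟩
        rw [← pyGetD_nonneg_getD data sx a1]
        exact a4
      have hg : onGrid (sx, v) := by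
        by_contra hng
        exact hdata _ hmem hng honD
      obtain ⟨hsx0, hsx4, hv0, hv4⟩ := hg
      obtain ⟨hfull, hnoS⟩ := hgrid ⟨(sx, v), hmem, ⟨hsx0, hsx4, hv0, hv4⟩⟩
      obtain ⟨-, hsy0, hsy4⟩ := student_in_grid data sx sy hnoS hok hS
      refine ⟨(sx, v), hmem, Or.inl ?_⟩
      exact ⟨sy, ⟨⟨hsx0, hsx4⟩, hsy0, hsy4⟩, hS, Ne.symm hne, by omega, by omega,
        fun y hy1 hy2 => (hbet y hy1 hy2).2⟩

-- ===== VERDICT (by name: the statement is the Claim_ definition above) =====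
theorem check_std_spec : Claim_equal_check_std := by
  intro teachers data IsAvoided _ hPre
  unfold Spec_check_std
  have hiff : check_std teachers data IsAvoided = false ↔
      check_std_alt teachers data IsAvoided = false := by
    rw [A_false_iff, alt_false_iff]
    exact bridge teachers data IsAvoided hPre
  cases hA : check_std teachers data IsAvoided with
  | false => exact ((hiff.mp hA).symm)
  | true =>
    cases hB : check_std_alt teachers data IsAvoided with
    | true => rfl
    | false => rw [hiff.mpr hB] at hA; cases hA
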